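-- pv_equiv track=rewrite | github.com/timcarpe/GCSE-Test-Builder | src/gcse_toolkit/extractor_v2/slicing/bounds_calculator.py | _cluster_by_page
-- ===== SOURCE A (Python) =====
-- from typing import Dict, List, Optional, Tuple, TYPE_CHECKING
--
-- def _cluster_by_page(y_positions: List[int], gap_threshold: int) -> List[List[int]]:
--     """
--     Group items into pages by Y position gaps.
--
--     Large Y gaps (> gap_threshold) indicate page boundaries.
--
--     Args:
--         y_positions: List of Y coordinates
--         gap_threshold: Minimum gap to consider a new page
--
--     Returns:
--         List of index lists, one per page
--     """
--     if not y_positions: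
--         return []
--
--     # Sort by Y position
--     sorted_indices = sorted(range(len(y_positions)), key=lambda i: y_positions[i])
--
--     # Group into pages
--     pages = []
--     current_page = [sorted_indices[0]]
--
--     for i in range(1, len(sorted_indices)):
--         idx = sorted_indices[i]
--         prev_idx = sorted_indices[i - 1]
--
--         if y_positions[idx] - y_positions[prev_idx] > gap_threshold:
--             # New page detected
--             pages.append(current_page)
--             current_page = [idx]
--         else:
--             current_page.append(idx)
--
--     pages.append(current_page)
--     return pages
-- ===== SOURCE B (Python) =====
-- from typing import List
--
--
-- def _cluster_by_page(y_positions: List[int], gap_threshold: int) -> List[List[int]]: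
--     """Sort (y, index) pairs, then cluster by divide and conquer: split in half,
--     cluster each half, and merge the halves (joining the touching pages when the
--     gap between them is small)."""
--     order = [i for _, i in sorted((y, i) for i, y in enumerate(y_positions))]
--
--     def cluster(chunk: List[int]) -> List[List[int]]:
--         if len(chunk) <= 1:
--             return [chunk] if chunk else []
--         mid = len(chunk) // 2
--         left = cluster(chunk[:mid])
--         right = cluster(chunk[mid:])
--         if y_positions[right[0][0]] - y_positions[left[-1][-1]] > gap_threshold:
--             return left + right
--         return left[:-1] + [left[-1] + right[0]] + right[1:]
--
--     return cluster(order)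
-- ===== Notes on version B (the rewrite author's own statement) =====
-- stated objective: alternative
-- what changed: A makes one left-to-right pass over the sorted order, mutating a current_page accumulator and flushing it at each large gap; B sorts (y, index) pairs instead of index-sorting with a key, then clusters by divide and conquer: recursively cluster each half of the sorted order and merge the two page lists, joining the adjacent pages when the gap between the halves is small.
import Mathlib
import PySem

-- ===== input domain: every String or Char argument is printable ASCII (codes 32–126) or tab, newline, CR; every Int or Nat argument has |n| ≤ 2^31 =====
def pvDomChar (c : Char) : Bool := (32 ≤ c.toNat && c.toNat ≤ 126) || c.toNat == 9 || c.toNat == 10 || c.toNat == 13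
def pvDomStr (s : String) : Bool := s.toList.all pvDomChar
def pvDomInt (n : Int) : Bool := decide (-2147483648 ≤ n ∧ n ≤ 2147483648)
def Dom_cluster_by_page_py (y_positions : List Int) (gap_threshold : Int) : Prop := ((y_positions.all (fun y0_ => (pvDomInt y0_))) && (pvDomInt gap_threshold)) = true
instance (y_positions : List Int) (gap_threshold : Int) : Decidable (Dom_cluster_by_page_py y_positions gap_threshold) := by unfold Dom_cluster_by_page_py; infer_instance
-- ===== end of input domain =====

-- B replaces A's single left-to-right accumulation pass by (y, index) pair sorting plus
-- divide-and-conquer clustering (cluster each half, merge the page lists); no behaviour change.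

-- ===== PORT A =====
-- sorted(range(len(y_positions)), key=lambda i: y_positions[i])
-- (indices produced by range are always in range for y_positions, so pyGetD's default is never consulted)
def pvSortedIdx (y_positions : List Int) : List Int :=
  PySem.List.sorted (PySem.List.pyRange 0 (y_positions.length : Int) 1)
    (fun i => PySem.List.pyGetD y_positions i 0) false

def cluster_by_page_py (y_positions : List Int) (gap_threshold : Int) : List (List Int) :=
  if y_positions = [] then []
  else
    let sorted_indices := pvSortedIdx y_positions
    let st := (PySem.List.pyRange 1 (sorted_indices.length : Int) 1).foldl
      (fun (st : List (List Int) × List Int) i =>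
        let idx := PySem.List.pyGetD sorted_indices i 0
        let prev_idx := PySem.List.pyGetD sorted_indices (i - 1) 0
        if PySem.List.pyGetD y_positions idx 0 - PySem.List.pyGetD y_positions prev_idx 0 > gap_threshold then
          (st.1 ++ [st.2], [idx])
        else
          (st.1, st.2 ++ [idx]))
      ([], [PySem.List.pyGetD sorted_indices 0 0])
    st.1 ++ [st.2]

-- ===== PORT B =====
-- order = [i for _, i in sorted((y, i) for i, y in enumerate(y_positions))]
-- (a Python tuple sort: PySem.List.sorted2 with keys fst, snd)
def pvOrder (y_positions : List Int) : List Int :=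
  (PySem.List.sorted2 ((PySem.List.enumerate y_positions).map (fun p => (p.2, p.1)))
    Prod.fst Prod.snd false).map Prod.snd

-- def cluster(chunk): recurse on the two halves (mid = len(chunk) // 2), then merge the two
-- page lists; chunk[:mid], chunk[mid:], left[:-1], right[1:], left[-1], right[0] via PySem.
def pvCluster (y_positions : List Int) (gap_threshold : Int) (chunk : List Int) : List (List Int) :=
  if h : chunk.length ≤ 1 then (if chunk = [] then [] else [chunk])
  else
    let mid : Int := PySem.Int.floordiv (chunk.length : Int) 2
    let left := pvCluster y_positions gap_threshold (PySem.List.slice chunk none (some mid))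
    let right := pvCluster y_positions gap_threshold (PySem.List.slice chunk (some mid) none)
    if PySem.List.pyGetD y_positions (PySem.List.pyGetD (PySem.List.pyGetD right 0 []) 0 0) 0 -
       PySem.List.pyGetD y_positions (PySem.List.pyGetD (PySem.List.pyGetD left (-1) []) (-1) 0) 0 > gap_threshold
    then left ++ right
    else PySem.List.slice left none (some (-1)) ++
      ((PySem.List.pyGetD left (-1) [] ++ PySem.List.pyGetD right 0 []) :: PySem.List.slice right (some 1) none)
termination_by chunk.length
decreasing_by
  · have hm : (PySem.Int.floordiv (chunk.length : Int) 2) = ((chunk.length / 2 : Nat) : Int) := by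
      exact_mod_cast PySem.Int.floordiv_natCast chunk.length 2
    rw [hm, PySem.List.slice_to_natCast]
    simp only [List.length_take]
    omega
  · have hm : (PySem.Int.floordiv (chunk.length : Int) 2) = ((chunk.length / 2 : Nat) : Int) := by
      exact_mod_cast PySem.Int.floordiv_natCast chunk.length 2
    rw [hm, PySem.List.slice_from_natCast]
    simp only [List.length_drop]
    omega

def cluster_by_page_py_alt (y_positions : List Int) (gap_threshold : Int) : List (List Int) :=
  pvCluster y_positions gap_threshold (pvOrder y_positions)

-- ===== PRECONDITION & SPEC =====
def Spec_cluster_by_page_py (y_positions : List Int) (gap_threshold : Int) (out : List (List Int)) : Prop := out = cluster_by_page_py_alt y_positions gap_threshold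
instance (y_positions : List Int) (gap_threshold : Int) (out : List (List Int)) : Decidable (Spec_cluster_by_page_py y_positions gap_threshold out) := by unfold Spec_cluster_by_page_py; infer_instance

-- ===== CLAIM (what is proved, stated in full; the proofs are below) =====
def Claim_equal_cluster_by_page_py : Prop := ∀ (y_positions : List Int) (gap_threshold : Int), Dom_cluster_by_page_py y_positions gap_threshold → Spec_cluster_by_page_py y_positions gap_threshold (cluster_by_page_py y_positions gap_threshold)

-- ===== LEMMAS AND PROOFS =====

-- the gap test on two indices a, b (y[b] - y[a] > gap)
def pvT (ys : List Int) (gap : Int) (a b : Int) : Bool :=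
  decide (PySem.List.pyGetD ys b 0 - PySem.List.pyGetD ys a 0 > gap)

theorem pv_getD_zero_headD {α : Type} (xs : List α) (d : α) : xs.getD 0 d = xs.headD d := by
  cases xs <;> simp

def pvConsHead (x : Int) : List (List Int) → List (List Int)
  | [] => [[x]]
  | p :: ps => (x :: p) :: ps

def pvCl (t : Int → Int → Bool) : List Int → List (List Int)
  | [] => []
  | [x] => [[x]]
  | x :: y :: r => if t x y then [x] :: pvCl t (y :: r) else pvConsHead x (pvCl t (y :: r))

theorem pv_getLast?_cons {α : Type} (x : α) (q : List α) (h : q ≠ []) :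
    (x :: q).getLast? = q.getLast? := by
  cases q with
  | nil => simp at h
  | cons a as => exact List.getLast?_cons_cons ..

theorem pvConsHead_ne_nil (x : Int) (P : List (List Int)) : pvConsHead x P ≠ [] := by
  cases P <;> simp [pvConsHead]

theorem pvCl_ne_nil (t : Int → Int → Bool) (l : List Int) (h : l ≠ []) : pvCl t l ≠ [] := by
  match l with
  | [x] => simp [pvCl]
  | x :: y :: r =>
    simp only [pvCl]
    split
    · simp
    · exact pvConsHead_ne_nil _ _

theorem pvCl_pages_ne_nil (t : Int → Int → Bool) (l : List Int) :
    ∀ p ∈ pvCl t l, p ≠ [] := by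
  induction l using pvCl.induct t with
  | case1 => simp [pvCl]
  | case2 x => simp [pvCl]
  | case3 x y r ht ih =>
    simp only [pvCl, ht, if_true]
    intro p hp
    rcases List.mem_cons.mp hp with rfl | hp
    · simp
    · exact ih p hp
  | case4 x y r ht ih =>
    simp only [pvCl]
    rw [if_neg ht]
    intro p hp
    cases hP : pvCl t (y :: r) with
    | nil => exact absurd hP (pvCl_ne_nil t _ (by simp))
    | cons q qs =>
      rw [hP] at hp
      simp only [pvConsHead] at hp
      rcases List.mem_cons.mp hp with rfl | hp
      · simp
      · exact ih p (by rw [hP]; exact List.mem_cons_of_mem _ hp)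

theorem pvCl_headhead (t : Int → Int → Bool) (l : List Int) (h : l ≠ []) :
    ((pvCl t l).headD []).headD 0 = l.headD 0 := by
  match l with
  | [x] => simp [pvCl]
  | x :: y :: r =>
    simp only [pvCl]
    split
    · simp
    · cases hP : pvCl t (y :: r) with
      | nil => exact absurd hP (pvCl_ne_nil t _ (by simp))
      | cons q qs => simp [pvConsHead]

theorem pvCl_lastlast (t : Int → Int → Bool) (l : List Int) (h : l ≠ []) :
    ((pvCl t l).getLast?.getD []).getLast?.getD 0 = l.getLast?.getD 0 := by
  induction l using pvCl.induct t with
  | case1 => simp at h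
  | case2 x => simp [pvCl]
  | case3 x y r ht ih =>
    simp only [pvCl, ht, if_true]
    rw [pv_getLast?_cons _ _ (pvCl_ne_nil t (y :: r) (by simp)),
        pv_getLast?_cons x (y :: r) (by simp)]
    exact ih (by simp)
  | case4 x y r ht ih =>
    simp only [pvCl]
    rw [if_neg ht]
    have ih' := ih (by simp)
    cases hP : pvCl t (y :: r) with
    | nil => exact absurd hP (pvCl_ne_nil t _ (by simp))
    | cons q qs =>
      rw [hP] at ih'
      have hq : q ≠ [] := pvCl_pages_ne_nil t (y :: r) q (by rw [hP]; simp)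
      simp only [pvConsHead]
      rw [pv_getLast?_cons x (y :: r) (by simp)]
      cases qs with
      | nil =>
        simp only [List.getLast?_singleton, Option.getD_some] at ih' ⊢
        rw [pv_getLast?_cons x q hq]
        exact ih'
      | cons q2 qs2 =>
        rw [pv_getLast?_cons _ _ (by simp : (q2 :: qs2 : List (List Int)) ≠ [])] at ih' ⊢
        exact ih'

theorem pvCl_append (t : Int → Int → Bool) (a b : List Int) (ha : a ≠ []) (hb : b ≠ []) :
    pvCl t (a ++ b) =
      if t (a.getLast?.getD 0) (b.headD 0) then pvCl t a ++ pvCl t b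
      else (pvCl t a).dropLast ++
        (((pvCl t a).getLast?.getD [] ++ (pvCl t b).headD []) :: (pvCl t b).tail) := by
  induction a using pvCl.induct t with
  | case1 => simp at ha
  | case2 x =>
    cases b with
    | nil => simp at hb
    | cons z bs =>
      simp only [List.cons_append, List.nil_append, pvCl]
      by_cases hxz : t x z = true
      · rw [if_pos hxz]
        simp only [List.getLast?_singleton, Option.getD_some, List.headD_cons]
        rw [if_pos hxz]
      · rw [if_neg hxz]
        simp only [List.getLast?_singleton, Option.getD_some, List.headD_cons]
        rw [if_neg hxz]
        cases hQ : pvCl t (z :: bs) with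
        | nil => exact absurd hQ (pvCl_ne_nil t _ (by simp))
        | cons q qs => simp [pvConsHead]
  | case3 x y r ht ih =>
    have ih' := ih (by simp)
    have hP : pvCl t (x :: y :: r) = [x] :: pvCl t (y :: r) := by
      simp only [pvCl, ht, if_true]
    have hPne := pvCl_ne_nil t (y :: r) (by simp)
    have hlast : (x :: y :: r).getLast?.getD 0 = (y :: r).getLast?.getD 0 := by
      rw [pv_getLast?_cons x (y :: r) (by simp)]
    show pvCl t (x :: ((y :: r) ++ b)) = _
    have : pvCl t (x :: ((y :: r) ++ b)) = [x] :: pvCl t ((y :: r) ++ b) := by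
      simp only [List.cons_append, pvCl, ht, if_true]
    rw [this, ih', hP, hlast]
    by_cases htest : t ((y :: r).getLast?.getD 0) (b.headD 0) = true
    · rw [if_pos htest, if_pos htest]
      rfl
    · rw [if_neg htest, if_neg htest]
      cases hPP : pvCl t (y :: r) with
      | nil => exact absurd hPP (pvCl_ne_nil t _ (by simp))
      | cons p ps =>
        simp [List.getLast?_cons_cons]
  | case4 x y r ht ih =>
    have ih' := ih (by simp)
    have hP : pvCl t (x :: y :: r) = pvConsHead x (pvCl t (y :: r)) := by
      simp only [pvCl]; rw [if_neg ht]
    have hlast : (x :: y :: r).getLast?.getD 0 = (y :: r).getLast?.getD 0 := by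
      rw [pv_getLast?_cons x (y :: r) (by simp)]
    show pvCl t (x :: ((y :: r) ++ b)) = _
    have hL : pvCl t (x :: ((y :: r) ++ b)) = pvConsHead x (pvCl t ((y :: r) ++ b)) := by
      simp only [List.cons_append, pvCl]; rw [if_neg ht]
    rw [hL, ih', hP, hlast]
    cases hPP : pvCl t (y :: r) with
    | nil => exact absurd hPP (pvCl_ne_nil t _ (by simp))
    | cons p ps =>
      by_cases htest : t ((y :: r).getLast?.getD 0) (b.headD 0) = true
      · rw [if_pos htest, if_pos htest]
        simp [pvConsHead]
      · rw [if_neg htest, if_neg htest]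
        cases ps with
        | nil => simp [pvConsHead]
        | cons p2 ps2 => simp [pvConsHead, List.getLast?_cons_cons]

-- xs[i] and (xs ++ [x])[i] agree below len(xs)
theorem pvGetD_append_left (c : List Int) (x : Int) (i : Int) (h0 : 0 ≤ i) (h1 : i < c.length) :
    PySem.List.pyGetD (c ++ [x]) i 0 = PySem.List.pyGetD c i 0 := by
  rw [PySem.List.pyGetD_eq_getElem _ 0 h0 (by simp; omega),
      PySem.List.pyGetD_eq_getElem _ 0 h0 (by exact_mod_cast h1)]
  exact List.getElem_append_left (by omega)

-- A's loop body, abstracted over the gap test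
def pvAStep (t : Int → Int → Bool) (c : List Int) (st : List (List Int) × List Int) (i : Int) :
    List (List Int) × List Int :=
  if t (PySem.List.pyGetD c (i - 1) 0) (PySem.List.pyGetD c i 0) then
    (st.1 ++ [st.2], [PySem.List.pyGetD c i 0])
  else
    (st.1, st.2 ++ [PySem.List.pyGetD c i 0])

theorem pvAFold_eq (t : Int → Int → Bool) (c : List Int) (hc : c ≠ []) :
    (PySem.List.pyRange 1 (c.length : Int) 1).foldl (pvAStep t c)
        ([], [PySem.List.pyGetD c 0 0])
      = ((pvCl t c).dropLast, (pvCl t c).getLast?.getD []) := by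
  induction c using List.reverseRecOn with
  | nil => simp at hc
  | append_singleton c x ih =>
    cases hcn : decide (c = []) with
    | true =>
      have : c = [] := of_decide_eq_true hcn
      subst this
      simp only [List.nil_append, List.length_singleton]
      rw [show ((1:Nat):Int) = 1 by norm_num, PySem.List.pyRange_one_eq_nil (by norm_num)]
      simp [pvCl, PySem.List.pyGetD_zero_cons]
    | false =>
      have hcne : c ≠ [] := of_decide_eq_false hcn
      have hn1 : 1 ≤ c.length := List.length_pos_of_ne_nil hcne
      have hlen : (((c ++ [x]).length : Nat) : Int) = (c.length : Int) + 1 := by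
        simp [List.length_append]
      rw [hlen, PySem.List.pyRange_one_succ_right (by exact_mod_cast hn1), List.foldl_append]
      have hcongr : (PySem.List.pyRange 1 (c.length : Int) 1).foldl (pvAStep t (c ++ [x]))
            ([], [PySem.List.pyGetD (c ++ [x]) 0 0])
          = (PySem.List.pyRange 1 (c.length : Int) 1).foldl (pvAStep t c)
            ([], [PySem.List.pyGetD c 0 0]) := by
        rw [pvGetD_append_left c x 0 le_rfl (by exact_mod_cast hn1)]
        apply PySem.List.foldl_congr_mem
        intro acc i hi
        rw [PySem.List.mem_pyRange_one] at hi
        unfold pvAStep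
        rw [pvGetD_append_left c x i (by omega) hi.2,
            pvGetD_append_left c x (i - 1) (by omega) (by omega)]
      rw [hcongr, ih hcne]
      -- the one extra step at i = c.length
      have hPne := pvCl_ne_nil t c hcne
      have hgetx : PySem.List.pyGetD (c ++ [x]) (c.length : Int) 0 = x := by
        rw [PySem.List.pyGetD_eq_getElem _ 0 (by positivity) (by simp)]
        exact List.getElem_concat_length (by simp) _
      have hgetlast : PySem.List.pyGetD (c ++ [x]) ((c.length : Int) - 1) 0 = c.getLast?.getD 0 := by
        rw [pvGetD_append_left c x _ (by omega) (by omega),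
            PySem.List.pyGetD_eq_getElem _ 0 (by omega) (by omega),
            List.getLast?_eq_some_getLast hcne]
        simp only [Option.getD_some]
        rw [List.getLast_eq_getElem hcne]
        congr 1
        omega
      simp only [List.foldl_cons, List.foldl_nil]
      unfold pvAStep
      rw [hgetx, hgetlast]
      rw [pvCl_append t c [x] hcne (by simp)]
      simp only [List.headD_cons]
      by_cases htest : t (c.getLast?.getD 0) x = true
      · rw [if_pos htest, if_pos htest]
        simp only [pvCl, List.dropLast_concat, List.getLast?_concat, Option.getD_some]
        refine Prod.ext ?_ rfl
        show (pvCl t c).dropLast ++ [(pvCl t c).getLast?.getD []] = pvCl t c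
        rw [List.getLast?_eq_some_getLast hPne, Option.getD_some]
        exact List.dropLast_append_getLast hPne
      · rw [if_neg htest, if_neg htest]
        simp only [pvCl]
        refine Prod.ext ?_ ?_
        · show (pvCl t c).dropLast =
            ((pvCl t c).dropLast ++ (((pvCl t c).getLast?.getD [] ++ [x]) :: List.tail [[x]])).dropLast
          simp
        · show (pvCl t c).getLast?.getD [] ++ [x] =
            ((pvCl t c).dropLast ++ (((pvCl t c).getLast?.getD [] ++ [x]) :: List.tail [[x]])).getLast?.getD []
          simp

theorem pvCluster_eq (ys : List Int) (gap : Int) (chunk : List Int) :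
    pvCluster ys gap chunk = pvCl (pvT ys gap) chunk := by
  have main : ∀ (n : Nat) (c : List Int), c.length = n →
      pvCluster ys gap c = pvCl (pvT ys gap) c := by
    intro n
    induction n using Nat.strong_induction_on with
    | _ n ih =>
      intro c hlen
      rw [pvCluster]
      by_cases h1 : c.length ≤ 1
      · rw [dif_pos h1]
        match c, h1 with
        | [], _ => rfl
        | [x], _ => simp [pvCl]
      · rw [dif_neg h1]
        have hm : PySem.Int.floordiv ((c.length : Nat) : Int) 2 = ((c.length / 2 : Nat) : Int) := by
          exact_mod_cast PySem.Int.floordiv_natCast c.length 2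
        simp only [hm, PySem.List.slice_to_natCast, PySem.List.slice_from_natCast]
        set m : Nat := c.length / 2 with hmdef
        have hm1 : 1 ≤ m := by omega
        have hmlt : m < c.length := by omega
        have ha : (c.take m).length < n := by rw [List.length_take]; omega
        have hb : (c.drop m).length < n := by rw [List.length_drop]; omega
        have hane : c.take m ≠ [] :=
          List.ne_nil_of_length_pos (by rw [List.length_take]; omega)
        have hbne : c.drop m ≠ [] :=
          List.ne_nil_of_length_pos (by rw [List.length_drop]; omega)
        rw [ih _ ha _ rfl, ih _ hb _ rfl]
        set t := pvT ys gap with htdef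
        set a := c.take m
        set b := c.drop m
        have hLne : pvCl t a ≠ [] := pvCl_ne_nil t a hane
        have hRne : pvCl t b ≠ [] := pvCl_ne_nil t b hbne
        have hhead : PySem.List.pyGetD (PySem.List.pyGetD (pvCl t b) 0 []) 0 0 = b.headD 0 := by
          rw [PySem.List.pyGetD_zero, PySem.List.pyGetD_zero, pv_getD_zero_headD,
            pv_getD_zero_headD]
          exact pvCl_headhead t b hbne
        have hlastpage : PySem.List.pyGetD (pvCl t a) (-1) [] = (pvCl t a).getLast?.getD [] := by
          rw [PySem.List.pyGetD_neg_one _ _ hLne, List.getLast?_eq_some_getLast hLne,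
            Option.getD_some]
        have hpne : (pvCl t a).getLast?.getD [] ≠ [] := by
          rw [List.getLast?_eq_some_getLast hLne, Option.getD_some]
          exact pvCl_pages_ne_nil t a _ (List.getLast_mem hLne)
        have hlast : PySem.List.pyGetD (PySem.List.pyGetD (pvCl t a) (-1) []) (-1) 0
            = a.getLast?.getD 0 := by
          rw [hlastpage, PySem.List.pyGetD_neg_one _ _ hpne, ← pvCl_lastlast t a hane,
            List.getLast?_eq_some_getLast hpne, Option.getD_some]
        rw [hhead, hlast, hlastpage]
        have hsplit := pvCl_append t a b hane hbne
        rw [List.take_append_drop] at hsplit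
        rw [hsplit]
        by_cases htest : PySem.List.pyGetD ys (b.headD 0) 0 -
            PySem.List.pyGetD ys (a.getLast?.getD 0) 0 > gap
        · rw [if_pos htest, if_pos (by rw [htdef]; exact decide_eq_true htest)]
        · rw [if_neg htest, if_neg (by rw [htdef]; simp only [pvT]; simpa using htest)]
          rw [PySem.List.slice_to_neg_one, PySem.List.slice_from_one,
            PySem.List.pyGetD_zero, pv_getD_zero_headD]
  exact main chunk.length chunk rfl


theorem pv_insertBy_congr {α : Type} (b1 b2 : α → α → Bool) (x : α) (acc : List α)
    (h : ∀ y ∈ acc, b1 x y = b2 x y) :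
    PySem.List.insertBy b1 x acc = PySem.List.insertBy b2 x acc := by
  induction acc with
  | nil => rfl
  | cons y ys ih =>
    simp only [PySem.List.insertBy]
    rw [h y (by simp)]
    by_cases hb : b2 x y = true
    · rw [if_pos hb, if_pos hb]
    · rw [if_neg hb, if_neg hb, ih (fun z hz => h z (by simp [hz]))]

-- the two comparators used below
def pvLt1 (u v : Int × Int) : Bool := decide (u.1 < v.1)
def pvLt2 (u v : Int × Int) : Bool :=
  decide (u.1 < v.1) || (!decide (v.1 < u.1) && decide (u.2 < v.2))

theorem pv_foldl_insert2 (ps : List (Int × Int)) :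
    ∀ (acc : List (Int × Int)), (∀ u ∈ ps, ∀ v ∈ acc, v.2 < u.2) →
    ps.Pairwise (fun u v => u.2 < v.2) →
    ps.foldl (fun acc x => PySem.List.insertBy pvLt2 x acc) acc
      = ps.foldl (fun acc x => PySem.List.insertBy pvLt1 x acc) acc := by
  induction ps with
  | nil => intro acc _ _; rfl
  | cons x rest ih =>
    intro acc hacc hp
    simp only [List.foldl_cons]
    have hstep : PySem.List.insertBy pvLt2 x acc = PySem.List.insertBy pvLt1 x acc := by
      apply pv_insertBy_congr
      intro v hv
      have hvx : v.2 < x.2 := hacc x (by simp) v hv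
      simp only [pvLt1, pvLt2]
      have : decide (x.2 < v.2) = false := by simp; omega
      rw [this]
      simp
    rw [hstep]
    apply ih
    · intro u hu v hv
      rcases (PySem.List.mem_insertBy _ _ _ _).mp hv with rfl | hv
      · exact (List.pairwise_cons.mp hp).1 u hu
      · exact hacc u (by simp [hu]) v hv
    · exact (List.pairwise_cons.mp hp).2

theorem pv_sorted2_eq_sorted_fst (ps : List (Int × Int))
    (hp : ps.Pairwise (fun u v => u.2 < v.2)) :
    PySem.List.sorted2 ps Prod.fst Prod.snd false = PySem.List.sorted ps Prod.fst false := by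
  rw [PySem.List.sorted_eq_foldl_insertBy]
  show ps.foldl (fun acc x => PySem.List.insertBy pvLt2 x acc) []
      = ps.foldl (fun acc x => PySem.List.insertBy pvLt1 x acc) []
  exact pv_foldl_insert2 ps [] (by simp) hp

theorem pv_insertBy_map (g : Int → Int × Int) (x : Int) (acc : List Int) :
    PySem.List.insertBy pvLt1 (g x) (acc.map g)
      = (PySem.List.insertBy (fun a b => decide ((g a).1 < (g b).1)) x acc).map g := by
  induction acc with
  | nil => rfl
  | cons y ys ih =>
    simp only [List.map_cons, PySem.List.insertBy]
    by_cases hb : decide ((g x).1 < (g y).1) = true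
    · rw [if_pos hb, if_pos (by simpa [pvLt1] using hb)]
      simp
    · rw [if_neg hb, if_neg (by simpa [pvLt1] using hb)]
      simp only [List.map_cons, ih]

theorem pv_sorted_map (g : Int → Int × Int) (xs : List Int) :
    PySem.List.sorted (xs.map g) Prod.fst false
      = (PySem.List.sorted xs (fun i => (g i).1) false).map g := by
  rw [PySem.List.sorted_eq_foldl_insertBy, PySem.List.sorted_eq_foldl_insertBy]
  rw [List.foldl_map]
  have main : ∀ (l : List Int) (acc : List Int),
      l.foldl (fun acc x => PySem.List.insertBy pvLt1 (g x) acc) (acc.map g)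
        = (l.foldl (fun acc x =>
            PySem.List.insertBy (fun a b => decide ((g a).1 < (g b).1)) x acc) acc).map g := by
    intro l
    induction l with
    | nil => intro acc; rfl
    | cons x rest ih =>
      intro acc
      simp only [List.foldl_cons]
      rw [pv_insertBy_map g x acc, ih]
  have := main xs []
  simpa using this

theorem pv_enum_swap (ys : List Int) :
    ∀ (s : Int), (PySem.List.enumerate ys s).map (fun p => (p.2, p.1))
      = (List.range ys.length).map (fun k => (ys.getD k 0, s + (k : Int))) := by
  induction ys with
  | nil => intro s; rfl
  | cons x t ih =>
    intro s
    rw [PySem.List.enumerate_cons, List.map_cons, List.length_cons, List.range_succ_eq_map,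
      List.map_cons, List.map_map, ih (s + 1)]
    refine congrArg₂ _ (by simp) ?_
    apply List.map_congr_left
    intro k _
    simp only [Function.comp_apply, List.getD_cons_succ]
    refine congrArg _ ?_
    push_cast
    ring

theorem pv_pairs_eq (ys : List Int) :
    (PySem.List.enumerate ys).map (fun p => (p.2, p.1))
      = (PySem.List.pyRange 0 (ys.length : Int) 1).map
          (fun i => (PySem.List.pyGetD ys i 0, i)) := by
  rw [pv_enum_swap ys 0, PySem.List.pyRange_zero_nat, List.map_map]
  apply List.map_congr_left
  intro k _
  simp

theorem pvOrder_eq' (ys : List Int) :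
    (PySem.List.sorted2 ((PySem.List.enumerate ys).map (fun p => (p.2, p.1)))
      Prod.fst Prod.snd false).map Prod.snd
    = PySem.List.sorted (PySem.List.pyRange 0 (ys.length : Int) 1)
        (fun i => PySem.List.pyGetD ys i 0) false := by
  rw [pv_pairs_eq]
  have hpw : ((PySem.List.pyRange 0 (ys.length : Int) 1).map
      (fun i => (PySem.List.pyGetD ys i 0, i))).Pairwise (fun u v => u.2 < v.2) := by
    apply List.Pairwise.map
    · intro a b h
      exact h
    · exact PySem.List.pairwise_lt_pyRange_one 0 _
  rw [pv_sorted2_eq_sorted_fst _ hpw, pv_sorted_map]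
  rw [List.map_map]
  have hid : (Prod.snd ∘ fun i : Int => (PySem.List.pyGetD ys i 0, i)) = fun i => i := rfl
  rw [hid]
  simp

theorem pvOrder_eq (ys : List Int) : pvOrder ys = pvSortedIdx ys := by
  unfold pvOrder pvSortedIdx
  exact pvOrder_eq' ys

-- ===== VERDICT (by name: the statement is the Claim_ definition above) =====
theorem cluster_by_page_py_spec : Claim_equal_cluster_by_page_py := by
  intro ys gap _
  unfold Spec_cluster_by_page_py cluster_by_page_py cluster_by_page_py_alt
  rw [pvCluster_eq, pvOrder_eq]
  by_cases hys : ys = []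
  · subst hys; rfl
  · simp only [hys, ite_false]
    have hL : pvSortedIdx ys ≠ [] := by
      intro h
      unfold pvSortedIdx at h
      rw [PySem.List.sorted_eq_nil_iff] at h
      have hn : (0 : Int) < (ys.length : Int) := by
        exact_mod_cast List.length_pos_of_ne_nil hys
      rw [PySem.List.pyRange_one_cons hn] at h
      exact absurd h (by simp)
    have hstep : (fun (st : List (List Int) × List Int) i =>
        let idx := PySem.List.pyGetD (pvSortedIdx ys) i 0
        let prev_idx := PySem.List.pyGetD (pvSortedIdx ys) (i - 1) 0
        if PySem.List.pyGetD ys idx 0 - PySem.List.pyGetD ys prev_idx 0 > gap then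
          (st.1 ++ [st.2], [idx])
        else
          (st.1, st.2 ++ [idx]))
        = pvAStep (fun a b => pvT ys gap a b) (pvSortedIdx ys) := by
      funext st i
      simp [pvAStep, pvT]
    rw [hstep, pvAFold_eq _ _ hL]
    have hcl := pvCl_ne_nil (fun a b => pvT ys gap a b) (pvSortedIdx ys) hL
    rw [List.getLast?_eq_some_getLast hcl, Option.getD_some]
    exact List.dropLast_append_getLast hcl
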